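-- pv_equiv track=rewrite | github.com/amefumi/amessager | lab2.py | gen_str
-- ===== SOURCE A (Python) =====
-- def gen_str(length):
--     res = ""
--     for a in range(65, 91):
--         for b in range(97, 123):
--             for c in range(10):
--                 res += chr(a) + chr(b) + str(c)
--                 if len(res) > length:
--                     return res
-- ===== SOURCE B (Python) =====
-- def gen_str(length):
--     # closed-form block count: A appends one 3-char block, then checks len > length
--     k = max(1, length // 3 + 1)
--     if k > 6760:  # A's loops are exhausted and it falls off the end (returns None)
--         return None
--     return ''.join(chr(65 + i // 260) + chr(97 + (i // 10) % 26) + str(i % 10)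
--                    for i in range(k))
-- ===== Notes on version B (the rewrite author's own statement) =====
-- stated objective: alternative
-- what changed: Replaces A's triple nested loop with an iterate-and-test early return by a closed-form block count k = max(1, length//3 + 1) and direct index decomposition i -> (i//260, (i//10)%26, i%10), joined in one pass.
-- outside the precondition, e.g. on gen_str(20280): A returns None, B returns None
import Mathlib
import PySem

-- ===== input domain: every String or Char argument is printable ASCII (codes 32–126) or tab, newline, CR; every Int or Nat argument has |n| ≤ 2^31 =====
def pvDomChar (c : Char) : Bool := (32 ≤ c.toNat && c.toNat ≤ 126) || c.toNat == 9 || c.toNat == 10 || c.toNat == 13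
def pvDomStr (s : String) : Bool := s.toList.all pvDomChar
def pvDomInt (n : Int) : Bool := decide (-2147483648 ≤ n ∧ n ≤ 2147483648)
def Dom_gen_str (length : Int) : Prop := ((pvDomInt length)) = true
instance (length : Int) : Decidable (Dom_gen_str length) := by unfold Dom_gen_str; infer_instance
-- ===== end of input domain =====

-- B replaces A's triple nested loop + early return by a closed-form block count and
-- direct index decomposition (alternative algorithm; same return value on Pre_).


-- ===== PORT A =====
-- chr(a) + chr(b) + str(c), as a list of chars
def pvBlockA (a b c : Int) : List Char :=
  Char.ofNat a.toNat :: Char.ofNat b.toNat :: (PySem.Int.toStr c).toList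

-- inner loop 'for c in range(10)': appends and may return early (Bool = returned)
def gen_str_loopC (length a b : Int) : List Int → List Char → List Char × Bool
  | [], res => (res, false)
  | c :: cs, res =>
    let res' := res ++ pvBlockA a b c
    if ((res'.length : Int) > length) then (res', true) else gen_str_loopC length a b cs res'

-- middle loop 'for b in range(97, 123)'
def gen_str_loopB (length a : Int) : List Int → List Char → List Char × Bool
  | [], res => (res, false)
  | b :: bs, res =>
    match gen_str_loopC length a b (PySem.List.pyRange 0 10 1) res with
    | (res', true) => (res', true)
    | (res', false) => gen_str_loopB length a bs res'

-- outer loop 'for a in range(65, 91)'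
def gen_str_loopA (length : Int) : List Int → List Char → List Char × Bool
  | [], res => (res, false)
  | a :: as_, res =>
    match gen_str_loopB length a (PySem.List.pyRange 97 123 1) res with
    | (res', true) => (res', true)
    | (res', false) => gen_str_loopA length as_ res'

def gen_str (length : Int) : String :=
  String.ofList (gen_str_loopA length (PySem.List.pyRange 65 91 1) []).1

-- ===== PORT B =====
-- chr(65 + i // 260) + chr(97 + (i // 10) % 26) + str(i % 10)
def pvBlockB (i : Int) : List Char :=
  Char.ofNat (65 + PySem.Int.floordiv i 260).toNat ::
  Char.ofNat (97 + PySem.Int.mod (PySem.Int.floordiv i 10) 26).toNat ::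
  (PySem.Int.toStr (PySem.Int.mod i 10)).toList

def gen_str_alt (length : Int) : String :=
  let k := max 1 (PySem.Int.floordiv length 3 + 1)
  String.ofList ((PySem.List.pyRange 0 k 1).flatMap pvBlockB)

-- ===== PRECONDITION & SPEC =====
-- Pre_ excludes length ≥ 20280: there Python A exhausts its loops and returns None,
-- which is not a value of the declared String type (B's Python returns None there too).
def Pre_gen_str (length : Int) : Prop := length < 20280
instance (length : Int) : Decidable (Pre_gen_str length) := by unfold Pre_gen_str; infer_instance

def pvWitness_gen_str : Int := (5)

def Spec_gen_str (length : Int) (out : String) : Prop := out = gen_str_alt length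
instance (length : Int) (out : String) : Decidable (Spec_gen_str length out) := by unfold Spec_gen_str; infer_instance

-- ===== CLAIM (what is proved, stated in full; the proofs are below) =====
def Claim_equal_gen_str : Prop := ∀ (length : Int), Dom_gen_str length → Pre_gen_str length → Spec_gen_str length (gen_str length)

-- ===== LEMMAS AND PROOFS =====

-- generic early-exit fold over a list of blocks (proof-only abstraction of A's loops)
def pvRun (length : Int) : List (List Char) → List Char → List Char × Bool
  | [], res => (res, false)
  | blk :: blks, res =>
    let res' := res ++ blk
    if ((res'.length : Int) > length) then (res', true) else pvRun length blks res'

theorem pvLoopC_eq_run (length a b : Int) (cs : List Int) (res : List Char) :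
    gen_str_loopC length a b cs res = pvRun length (cs.map (pvBlockA a b)) res := by
  induction cs generalizing res with
  | nil => rfl
  | cons c cs ih => simp [gen_str_loopC, pvRun, ih]

theorem pvRun_append (length : Int) (xs ys : List (List Char)) (res : List Char) :
    pvRun length (xs ++ ys) res =
      match pvRun length xs res with
      | (r, true) => (r, true)
      | (r, false) => pvRun length ys r := by
  induction xs generalizing res with
  | nil => rfl
  | cons x xs ih =>
    simp only [List.cons_append, pvRun]
    split_ifs with h
    · rfl
    · exact ih _

theorem pvLoopB_eq_run (length a : Int) (bs : List Int) (res : List Char) :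
    gen_str_loopB length a bs res =
      pvRun length (bs.flatMap (fun b => (PySem.List.pyRange 0 10 1).map (pvBlockA a b))) res := by
  induction bs generalizing res with
  | nil => rfl
  | cons b bs ih =>
    simp only [gen_str_loopB, List.flatMap_cons, pvRun_append, pvLoopC_eq_run, ih]

theorem pvLoopA_eq_run (length : Int) (as_ : List Int) (res : List Char) :
    gen_str_loopA length as_ res =
      pvRun length (as_.flatMap (fun a => (PySem.List.pyRange 97 123 1).flatMap
        (fun b => (PySem.List.pyRange 0 10 1).map (pvBlockA a b)))) res := by
  induction as_ generalizing res with
  | nil => rfl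
  | cons a as_ ih =>
    simp only [gen_str_loopA, List.flatMap_cons, pvRun_append, pvLoopB_eq_run, ih]

theorem pvRangeFlat {α : Type} (m n : Nat) (g : Nat → Nat → α) :
    (List.range m).flatMap (fun A => (List.range n).map (fun B => g A B)) =
    (List.range (m*n)).map (fun t => g (t / n) (t % n)) := by
  rcases Nat.eq_zero_or_pos n with hn | hn
  · subst hn; simp
  induction m with
  | zero => simp
  | succ m ih =>
    rw [List.range_succ, List.flatMap_append, ih, Nat.succ_mul, List.range_add,
        List.map_append, List.map_map]
    simp only [List.flatMap_cons, List.flatMap_nil, List.append_nil]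
    congr 1
    apply List.map_congr_left
    intro B hB
    simp only [List.mem_range] at hB
    have h1 : (m * n + B) / n = m := by
      rw [Nat.mul_comm, Nat.mul_add_div hn, Nat.div_eq_of_lt hB, Nat.add_zero]
    have h2 : (m * n + B) % n = B := by
      rw [Nat.mul_comm, Nat.mul_add_mod, Nat.mod_eq_of_lt hB]
    simp [Function.comp, h1, h2]

-- B's block formula at index t is exactly A's block at the decomposed coordinates
theorem pvCast (t : Nat) :
    pvBlockB (t : Int) = pvBlockA (65 + ((t/260 : Nat) : Int)) (97 + ((t/10 % 26 : Nat) : Int)) ((t % 10 : Nat) : Int) := by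
  simp [pvBlockA, pvBlockB]

-- A's enumeration order is exactly block-index order
theorem pvBig_eq :
    ((PySem.List.pyRange 65 91 1).flatMap (fun a => (PySem.List.pyRange 97 123 1).flatMap
      (fun b => (PySem.List.pyRange 0 10 1).map (pvBlockA a b)))) =
    (List.range 6760).map (fun i : Nat => pvBlockB (i : Int)) := by
  have e65 : PySem.List.pyRange 65 91 1 = (List.range 26).map (fun k : Nat => (65:Int) + (k:Int)) := by
    rw [PySem.List.pyRange_one]; rfl
  have e97 : PySem.List.pyRange 97 123 1 = (List.range 26).map (fun k : Nat => (97:Int) + (k:Int)) := by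
    rw [PySem.List.pyRange_one]; rfl
  have e0 : PySem.List.pyRange 0 10 1 = (List.range 10).map (fun k : Nat => (0:Int) + (k:Int)) := by
    rw [PySem.List.pyRange_one]; rfl
  rw [e65, e97, e0]
  simp only [List.flatMap_map, List.map_map]
  have hin : ∀ A : Nat,
      List.flatMap (fun B : Nat => List.map (pvBlockA (65 + (A:Int)) (97 + (B:Int)) ∘ fun k : Nat => (0:Int) + (k:Int)) (List.range 10)) (List.range 26) =
      List.map (fun s : Nat => pvBlockA (65 + (A:Int)) (97 + ((s/10 : Nat):Int)) ((0:Int) + ((s%10 : Nat):Int))) (List.range 260) := by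
    intro A
    simpa [Function.comp] using pvRangeFlat 26 10 (fun B C => pvBlockA (65 + (A:Int)) (97 + (B:Int)) ((0:Int) + (C:Int)))
  simp only [hin]
  have hout := pvRangeFlat 26 260 (fun A s => pvBlockA (65 + (A:Int)) (97 + ((s/10 : Nat):Int)) ((0:Int) + ((s%10 : Nat):Int)))
  rw [show (26*260 : Nat) = 6760 from rfl] at hout
  rw [hout]
  apply List.map_congr_left
  intro t _
  have d1 : t % 260 / 10 = t / 10 % 26 := by omega
  have d2 : t % 260 % 10 = t % 10 := by omega
  rw [d1, d2, pvCast]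
  simp

theorem pvToStrLen (d : Int) (h0 : 0 ≤ d) (h1 : d < 10) :
    ((PySem.Int.toStr d).toList).length = 1 := by
  interval_cases d <;> decide

theorem pvBlockB_len (i : Nat) : (pvBlockB (i : Int)).length = 3 := by
  simp only [pvBlockB, List.length_cons]
  rw [pvToStrLen _ (PySem.Int.mod_nonneg _ (by norm_num)) (PySem.Int.mod_lt _ (by norm_num))]

theorem pvStop_iff (length : Int) (j : Nat) :
    ((3 * ((j : Int) + 1)) > length) ↔ max 1 (PySem.Int.floordiv length 3 + 1) ≤ (j : Int) + 1 := by
  rw [PySem.Int.floordiv_eq_ediv_of_pos (by norm_num : (0:Int) < 3), max_le_iff]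
  omega

theorem pvRun_spec (length : Int) (n j : Nat) (res : List Char)
    (hres : res.length = 3 * j)
    (hlt : (j : Int) < max 1 (PySem.Int.floordiv length 3 + 1))
    (hle : max 1 (PySem.Int.floordiv length 3 + 1) ≤ (j : Int) + (n : Int)) :
    pvRun length ((List.range' j n).map (fun i : Nat => pvBlockB (i : Int))) res =
      (res ++ ((List.range' j ((max 1 (PySem.Int.floordiv length 3 + 1)).toNat - j)).map
        (fun i : Nat => pvBlockB (i : Int))).flatten, true) := by
  induction n generalizing j res with
  | zero =>
    exfalso
    have : ((0:Nat):Int) = 0 := rfl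
    omega
  | succ n ih =>
    rw [List.range'_succ]
    simp only [List.map_cons, pvRun]
    have hlen : (((res ++ pvBlockB (j : Int)).length : Nat) : Int) = 3 * ((j : Int) + 1) := by
      have := pvBlockB_len j
      simp [List.length_append, hres, this]; ring
    rw [hlen]
    by_cases hstop : (3 * ((j : Int) + 1)) > length
    · rw [if_pos hstop]
      have hk1 : max 1 (PySem.Int.floordiv length 3 + 1) ≤ (j : Int) + 1 := (pvStop_iff length j).mp hstop
      have hkj : (max 1 (PySem.Int.floordiv length 3 + 1)).toNat = j + 1 := by omega
      rw [hkj]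
      have h1 : j + 1 - j = 1 := by omega
      rw [h1, List.range'_one]
      simp
    · rw [if_neg hstop]
      have hk1 : ¬ max 1 (PySem.Int.floordiv length 3 + 1) ≤ (j : Int) + 1 :=
        fun h => hstop ((pvStop_iff length j).mpr h)
      have hlt' : ((j + 1 : Nat) : Int) < max 1 (PySem.Int.floordiv length 3 + 1) := by push_cast; omega
      have hle' : max 1 (PySem.Int.floordiv length 3 + 1) ≤ ((j + 1 : Nat) : Int) + (n : Int) := by
        push_cast at hle ⊢; omega
      have hres' : (res ++ pvBlockB (j : Int)).length = 3 * (j + 1) := by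
        have := pvBlockB_len j; simp [List.length_append, hres, this]; omega
      rw [ih (j + 1) _ hres' hlt' hle']
      have hsplit : (max 1 (PySem.Int.floordiv length 3 + 1)).toNat - j
          = ((max 1 (PySem.Int.floordiv length 3 + 1)).toNat - (j + 1)) + 1 := by omega
      rw [hsplit, List.range'_succ]
      simp

-- ===== VERDICT (by name: the statement is the Claim_ definition above) =====
theorem gen_str_spec : Claim_equal_gen_str := by
  intro length _ hpre
  unfold Pre_gen_str at hpre
  unfold Spec_gen_str gen_str gen_str_alt
  have hkk1 : (1:Int) ≤ max 1 (PySem.Int.floordiv length 3 + 1) := le_max_left _ _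
  have hfd : PySem.Int.floordiv length 3 + 1 ≤ 6760 := by
    rw [PySem.Int.floordiv_eq_ediv_of_pos (by norm_num : (0:Int) < 3)]
    omega
  have hkk2 : max 1 (PySem.Int.floordiv length 3 + 1) ≤ 6760 := by
    rw [max_le_iff]
    exact ⟨by norm_num, hfd⟩
  rw [pvLoopA_eq_run, pvBig_eq, List.range_eq_range']
  rw [pvRun_spec length 6760 0 [] (by simp)
       (by have := hkk1; omega)
       (by have := hkk2; omega)]
  simp only [List.nil_append, Nat.sub_zero]
  congr 1
  rw [PySem.List.pyRange_one]
  have hkt : ((max 1 (PySem.Int.floordiv length 3 + 1) - 0).toNat) = (max 1 (PySem.Int.floordiv length 3 + 1)).toNat := by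
    omega
  rw [hkt, List.flatMap_map, ← List.range_eq_range']
  rw [List.flatMap_def]
  apply congrArg
  apply List.map_congr_left
  intro t _
  simp
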